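-- pv_equiv track=rewrite | github.com/didymo/OnkoDICOM | src/View/mainpage/DrawROIWindow/Canvas.py | _iter_line_pixels
-- ===== SOURCE A (Python) =====
-- def _iter_line_pixels(x0: int, y0: int, x1: int, y1: int):
--     """Bresenham integer line iterator: yields (x, y) for every pixel crossed."""
--     dx = abs(x1 - x0)
--     dy = abs(y1 - y0)
--     sx = 1 if x0 < x1 else -1
--     sy = 1 if y0 < y1 else -1
--     x, y = x0, y0
--
--     if dx >= dy:
--         err = dx // 2
--         while x != x1:
--             yield x, y
--             err -= dy
--             if err < 0:
--                 y += sy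
--                 err += dx
--             x += sx
--         yield x1, y1
--     else:
--         err = dy // 2
--         while y != y1:
--             yield x, y
--             err -= dx
--             if err < 0:
--                 x += sx
--                 err += dy
--             y += sy
--         yield x1, y1
-- ===== SOURCE B (Python) =====
-- def _iter_line_pixels(x0: int, y0: int, x1: int, y1: int):
--     """Bresenham line pixels via a closed-form per-pixel formula (no running error term)."""
--     dx = abs(x1 - x0)
--     dy = abs(y1 - y0)
--     sx = 1 if x0 < x1 else -1
--     sy = 1 if y0 < y1 else -1
--     if dx >= dy:
--         if dx == 0:
--             yield x0, y0
--             return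
--         c = dx - 1 - dx // 2
--         for i in range(dx + 1):
--             yield x0 + sx * i, y0 + sy * ((i * dy + c) // dx)
--     else:
--         c = dy - 1 - dy // 2
--         for i in range(dy + 1):
--             yield x0 + sx * ((i * dx + c) // dy), y0 + sy * i
-- ===== Notes on version B (the rewrite author's own statement) =====
-- stated objective: alternative
-- what changed: Replaces Bresenham's running error accumulator and its conditional corrections by a direct closed-form integer-division formula computing the minor coordinate of each pixel independently from its index along the major axis.
import Mathlib
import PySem

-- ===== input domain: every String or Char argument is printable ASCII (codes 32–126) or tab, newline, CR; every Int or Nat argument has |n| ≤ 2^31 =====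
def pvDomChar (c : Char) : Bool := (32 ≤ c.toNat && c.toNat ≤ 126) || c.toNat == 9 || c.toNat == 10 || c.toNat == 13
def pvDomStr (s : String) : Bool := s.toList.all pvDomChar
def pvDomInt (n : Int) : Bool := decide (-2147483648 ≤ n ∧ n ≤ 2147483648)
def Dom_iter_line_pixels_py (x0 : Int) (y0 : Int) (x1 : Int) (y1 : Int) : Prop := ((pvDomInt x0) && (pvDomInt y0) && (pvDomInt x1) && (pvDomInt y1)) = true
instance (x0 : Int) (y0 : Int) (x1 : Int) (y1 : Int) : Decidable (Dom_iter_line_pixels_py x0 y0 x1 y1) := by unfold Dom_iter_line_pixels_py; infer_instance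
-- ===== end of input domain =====

-- B replaces A's running error accumulator and its conditional corrections by a direct
-- closed-form integer-division formula for the minor coordinate of each pixel
-- (objective: alternative — same O(max(dx,dy)) cost, per-pixel formula instead of loop state).

-- ===== PORT A =====
-- A's x-major while loop; fuel = number of remaining steps (|x1 - x|) makes the
-- recursion total; with that fuel the `x = x1` test is what terminates, as in Python.
def pvALoopX (fuel : Nat) (x1 y1 sx sy dx dy : Int) (x y err : Int) : List (Int × Int) :=
  if x = x1 then [(x1, y1)]
  else
    match fuel with
    | 0 => [(x1, y1)]  -- unreachable with fuel = |x1 - x|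
    | n + 1 =>
      (x, y) ::
        (if err - dy < 0 then pvALoopX n x1 y1 sx sy dx dy (x + sx) (y + sy) (err - dy + dx)
         else pvALoopX n x1 y1 sx sy dx dy (x + sx) y (err - dy))

-- A's y-major while loop, same shape with the roles of x and y exchanged.
def pvALoopY (fuel : Nat) (x1 y1 sx sy dx dy : Int) (x y err : Int) : List (Int × Int) :=
  if y = y1 then [(x1, y1)]
  else
    match fuel with
    | 0 => [(x1, y1)]
    | n + 1 =>
      (x, y) ::
        (if err - dx < 0 then pvALoopY n x1 y1 sx sy dx dy (x + sx) (y + sy) (err - dx + dy)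
         else pvALoopY n x1 y1 sx sy dx dy x (y + sy) (err - dx))

def iter_line_pixels_py (x0 : Int) (y0 : Int) (x1 : Int) (y1 : Int) : List (Int × Int) :=
  let dx := |x1 - x0|
  let dy := |y1 - y0|
  let sx : Int := if x0 < x1 then 1 else -1
  let sy : Int := if y0 < y1 then 1 else -1
  if dx ≥ dy then
    pvALoopX dx.toNat x1 y1 sx sy dx dy x0 y0 (PySem.Int.floordiv dx 2)
  else
    pvALoopY dy.toNat x1 y1 sx sy dx dy x0 y0 (PySem.Int.floordiv dy 2)

-- ===== PORT B =====
def iter_line_pixels_py_alt (x0 : Int) (y0 : Int) (x1 : Int) (y1 : Int) : List (Int × Int) :=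
  let dx := |x1 - x0|
  let dy := |y1 - y0|
  let sx : Int := if x0 < x1 then 1 else -1
  let sy : Int := if y0 < y1 then 1 else -1
  if dx ≥ dy then
    if dx = 0 then [(x0, y0)]
    else
      let c := dx - 1 - PySem.Int.floordiv dx 2
      (PySem.List.pyRange 0 (dx + 1) 1).map
        (fun i => (x0 + sx * i, y0 + sy * PySem.Int.floordiv (i * dy + c) dx))
  else
    let c := dy - 1 - PySem.Int.floordiv dy 2
    (PySem.List.pyRange 0 (dy + 1) 1).map
      (fun i => (x0 + sx * PySem.Int.floordiv (i * dx + c) dy, y0 + sy * i))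

-- ===== PRECONDITION & SPEC =====
def Spec_iter_line_pixels_py (x0 : Int) (y0 : Int) (x1 : Int) (y1 : Int) (out : List (Int × Int)) : Prop := out = iter_line_pixels_py_alt x0 y0 x1 y1
instance (x0 : Int) (y0 : Int) (x1 : Int) (y1 : Int) (out : List (Int × Int)) : Decidable (Spec_iter_line_pixels_py x0 y0 x1 y1 out) := by unfold Spec_iter_line_pixels_py; infer_instance

-- ===== CLAIM (what is proved, stated in full; the proofs are below) =====
def Claim_equal_iter_line_pixels_py : Prop := ∀ (x0 : Int) (y0 : Int) (x1 : Int) (y1 : Int), Dom_iter_line_pixels_py x0 y0 x1 y1 → Spec_iter_line_pixels_py x0 y0 x1 y1 (iter_line_pixels_py x0 y0 x1 y1)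

-- ===== LEMMAS AND PROOFS =====

theorem pvALoopY_eq_swap (fuel : Nat) :
    ∀ (x1 y1 sx sy dx dy x y err : Int),
      pvALoopY fuel x1 y1 sx sy dx dy x y err
        = (pvALoopX fuel y1 x1 sy sx dy dx y x err).map Prod.swap := by
  induction fuel with
  | zero =>
    intro x1 y1 sx sy dx dy x y err
    simp [pvALoopY, pvALoopX]
  | succ n ih =>
    intro x1 y1 sx sy dx dy x y err
    rw [pvALoopY, pvALoopX]
    by_cases h : y = y1
    · simp [h]
    · simp only [h, if_false]
      by_cases he : err - dx < 0 <;> simp [he, ih, Prod.swap]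

-- main invariant: with dx > 0, dy ≤ dx, the x-major loop from step i produces the
-- closed-form pixels for j = i .. dx
theorem pvALoopX_closed (x0 y0 sx sy dx dy : Int)
    (hdx : 0 < dx) (hdy : 0 ≤ dy) (hle : dy ≤ dx) (hsx : sx = 1 ∨ sx = -1) :
    ∀ (n : Nat) (i : Int), 0 ≤ i → i + (n : Int) = dx →
      pvALoopX n (x0 + sx * dx) (y0 + sy * dy) sx sy dx dy
        (x0 + sx * i) (y0 + sy * ((i * dy + (dx - 1 - dx / 2)) / dx))
        (dx / 2 - i * dy + ((i * dy + (dx - 1 - dx / 2)) / dx) * dx)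
      = (PySem.List.pyRange i (dx + 1) 1).map
          (fun j => (x0 + sx * j, y0 + sy * ((j * dy + (dx - 1 - dx / 2)) / dx))) := by
  have hc0 : (0:Int) ≤ dx - 1 - dx / 2 := by omega
  have hclt : dx - 1 - dx / 2 < dx := by omega
  intro n
  induction n with
  | zero =>
    intro i hi hn
    have hidx : i = dx := by omega
    rw [hidx]
    have hq : (dx * dy + (dx - 1 - dx / 2)) / dx = dy := by
      rw [show dx * dy + (dx - 1 - dx / 2) = (dx - 1 - dx / 2) + dy * dx by ring,
        Int.add_mul_ediv_right _ _ (ne_of_gt hdx), Int.ediv_eq_zero_of_lt hc0 hclt]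
      omega
    rw [PySem.List.pyRange_one_cons (by omega), PySem.List.pyRange_one_eq_nil (by omega)]
    simp [pvALoopX, hq]
  | succ n ih =>
    intro i hi hn
    have hne : x0 + sx * i ≠ x0 + sx * dx := by
      intro h
      rcases hsx with h1 | h1 <;> rw [h1] at h <;> omega
    set c := dx - 1 - dx / 2 with hc
    set q1 := (i * dy + c) / dx with hq1
    set q2 := ((i + 1) * dy + c) / dx with hq2
    have key1 := Int.ediv_add_emod (i * dy + c) dx
    have r1a := Int.emod_nonneg (i * dy + c) (ne_of_gt hdx)
    have r1b := Int.emod_lt_of_pos (i * dy + c) hdx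
    have key2 := Int.ediv_add_emod ((i + 1) * dy + c) dx
    have r2a := Int.emod_nonneg ((i + 1) * dy + c) (ne_of_gt hdx)
    have r2b := Int.emod_lt_of_pos ((i + 1) * dy + c) hdx
    have hb1 : q1 * dx ≤ i * dy + c ∧ i * dy + c < q1 * dx + dx := by
      constructor <;> linarith [key1, r1a, r1b, mul_comm dx q1]
    have hb2 : q2 * dx ≤ (i + 1) * dy + c ∧ (i + 1) * dy + c < q2 * dx + dx := by
      constructor <;> linarith [key2, r2a, r2b, mul_comm dx q2]
    have hdist : (i + 1) * dy = i * dy + dy := by ring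
    have hq2cases : q2 = q1 ∨ q2 = q1 + 1 := by
      have h1 : q2 * dx < (q1 + 2) * dx := by
        have e : (q1 + 2) * dx = q1 * dx + 2 * dx := by ring
        rw [e]; linarith [hb2.1, hb1.2, hdist, hle]
      have h2 : q1 * dx < (q2 + 1) * dx := by
        have e : (q2 + 1) * dx = q2 * dx + dx := by ring
        rw [e]
        have : i * dy ≤ (i + 1) * dy := by rw [hdist]; linarith
        linarith [hb1.1, hb2.2]
      have c1 := lt_of_mul_lt_mul_right h1 (le_of_lt hdx)
      have c2 := lt_of_mul_lt_mul_right h2 (le_of_lt hdx)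
      omega
    rw [pvALoopX, if_neg hne, PySem.List.pyRange_one_cons (by omega), List.map_cons]
    refine congrArg₂ _ rfl ?_
    have harg := ih (i + 1) (by omega) (by push_cast at hn ⊢; omega)
    rcases hq2cases with hq | hq
    · -- e = err - dy stays nonnegative: minor coordinate unchanged
      have hge : ¬ (dx / 2 - i * dy + q1 * dx - dy < 0) := by
        have h := hb2.2
        rw [hq] at h
        intro hcon; linarith [h, hdist]
      rw [if_neg hge]
      rw [← hq2, hq] at harg
      have e1 : x0 + sx * (i + 1) = x0 + sx * i + sx := by ring
      have e2 : dx / 2 - (i + 1) * dy + q1 * dx = dx / 2 - i * dy + q1 * dx - dy := by ring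
      rw [e1, e2] at harg
      exact harg
    · -- e = err - dy goes negative: minor coordinate steps and err += dx
      have hlt : dx / 2 - i * dy + q1 * dx - dy < 0 := by
        have h := hb2.1
        rw [hq] at h
        have e : (q1 + 1) * dx = q1 * dx + dx := by ring
        rw [e] at h
        linarith [h, hdist]
      rw [if_pos hlt]
      rw [← hq2, hq] at harg
      have e1 : x0 + sx * (i + 1) = x0 + sx * i + sx := by ring
      have e2 : y0 + sy * (q1 + 1) = y0 + sy * q1 + sy := by ring
      have e3 : dx / 2 - (i + 1) * dy + (q1 + 1) * dx = dx / 2 - i * dy + q1 * dx - dy + dx := by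
        ring
      rw [e1, e2, e3] at harg
      exact harg

-- ===== VERDICT (by name: the statement is the Claim_ definition above) =====
theorem iter_line_pixels_py_spec : Claim_equal_iter_line_pixels_py := by
  intro x0 y0 x1 y1 _
  unfold Spec_iter_line_pixels_py
  simp only [iter_line_pixels_py, iter_line_pixels_py_alt]
  set dx := |x1 - x0| with hdxd
  set dy := |y1 - y0| with hdyd
  set sx : Int := if x0 < x1 then (1:Int) else -1 with hsxd
  set sy : Int := if y0 < y1 then (1:Int) else -1 with hsyd
  have hdx0 : 0 ≤ dx := abs_nonneg _
  have hdy0 : 0 ≤ dy := abs_nonneg _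
  have hsx : sx = 1 ∨ sx = -1 := by rw [hsxd]; split <;> simp
  have hsy : sy = 1 ∨ sy = -1 := by rw [hsyd]; split <;> simp
  have hx1 : x1 = x0 + sx * dx := by
    rw [hsxd, hdxd]
    rcases abs_cases (x1 - x0) with ⟨h1, h2⟩ | ⟨h1, h2⟩ <;> rw [h1] <;> split <;> omega
  have hy1 : y1 = y0 + sy * dy := by
    rw [hsyd, hdyd]
    rcases abs_cases (y1 - y0) with ⟨h1, h2⟩ | ⟨h1, h2⟩ <;> rw [h1] <;> split <;> omega
  by_cases hcase : dx ≥ dy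
  · rw [if_pos hcase, if_pos hcase]
    by_cases h0 : dx = 0
    · rw [if_pos h0]
      have hxeq : x1 = x0 := by rw [hx1, h0]; ring
      have hdyz : dy = 0 := by omega
      have hyeq : y1 = y0 := by rw [hy1, hdyz]; ring
      rw [h0]
      simp [pvALoopX, hxeq, hyeq]
    · rw [if_neg h0]
      have hdxpos : 0 < dx := by omega
      rw [PySem.Int.floordiv_eq_ediv_of_pos (by norm_num : (0:Int) < 2)]
      simp only [PySem.Int.floordiv_eq_ediv_of_pos hdxpos]
      have main := pvALoopX_closed x0 y0 sx sy dx dy hdxpos hdy0 hcase hsx dx.toNat 0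
        le_rfl (by omega)
      have hz : ((0:Int) * dy + (dx - 1 - dx / 2)) / dx = 0 := by
        rw [zero_mul, zero_add]
        exact Int.ediv_eq_zero_of_lt (by omega) (by omega)
      rw [hz] at main
      simp only [zero_mul, mul_zero, add_zero, sub_zero] at main
      rw [← hx1, ← hy1] at main
      exact main
  · rw [if_neg hcase, if_neg hcase]
    have hlt : dx < dy := by omega
    have hdypos : 0 < dy := by omega
    rw [pvALoopY_eq_swap]
    rw [PySem.Int.floordiv_eq_ediv_of_pos (by norm_num : (0:Int) < 2)]
    simp only [PySem.Int.floordiv_eq_ediv_of_pos hdypos]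
    have main := pvALoopX_closed y0 x0 sy sx dy dx hdypos hdx0 (le_of_lt hlt) hsy dy.toNat 0
      le_rfl (by omega)
    have hz : ((0:Int) * dx + (dy - 1 - dy / 2)) / dy = 0 := by
      rw [zero_mul, zero_add]
      exact Int.ediv_eq_zero_of_lt (by omega) (by omega)
    rw [hz] at main
    simp only [zero_mul, mul_zero, add_zero, sub_zero] at main
    rw [← hx1, ← hy1] at main
    rw [main, List.map_map]
    rfl
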